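-- pv_equiv track=rewrite | github.com/butakun/AoC2021 | 19/19_1.py | find_transform_path
-- ===== SOURCE A (Python) =====
-- def find_transform_path(iscanner, mapping):
--     assert iscanner != 0
--
--     def dfs(i, path, mapping):
--         path.append(i)
--         if 0 in mapping[i]:
--             path.append(0)
--             return True
--         else:
--             for j in mapping[i].keys():
--                 if dfs(j, path, mapping):
--                     return True
--             path.pop()
--         return False
--
--     path = []
--     dfs(iscanner, path, mapping)
--     return path
-- ===== SOURCE B (Python) =====
-- def find_transform_path(iscanner, mapping):
--     # Iterative DFS with an explicit stack of (node, remaining-neighbor-keys) frames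
--     # instead of A's recursive helper mutating a shared path.
--     assert iscanner != 0
--     d0 = mapping[iscanner]
--     if 0 in d0:
--         return [iscanner, 0]
--     stack = [(iscanner, list(d0.keys()))]
--     path = [iscanner]
--     while stack:
--         node, rest = stack[-1]
--         if not rest:
--             stack.pop()
--             path.pop()
--             continue
--         j = rest[0]
--         stack[-1] = (node, rest[1:])
--         dj = mapping[j]
--         if 0 in dj:
--             path.append(j)
--             path.append(0)
--             return path
--         stack.append((j, list(dj.keys())))
--         path.append(j)
--     return path
-- ===== Notes on version B (the rewrite author's own statement) =====
-- stated objective: alternative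
-- what changed: A's recursive DFS helper mutating a shared path with pop-on-backtrack is replaced by an iterative DFS driven by an explicit stack of (node, remaining-neighbor-keys) frames.
import Mathlib
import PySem

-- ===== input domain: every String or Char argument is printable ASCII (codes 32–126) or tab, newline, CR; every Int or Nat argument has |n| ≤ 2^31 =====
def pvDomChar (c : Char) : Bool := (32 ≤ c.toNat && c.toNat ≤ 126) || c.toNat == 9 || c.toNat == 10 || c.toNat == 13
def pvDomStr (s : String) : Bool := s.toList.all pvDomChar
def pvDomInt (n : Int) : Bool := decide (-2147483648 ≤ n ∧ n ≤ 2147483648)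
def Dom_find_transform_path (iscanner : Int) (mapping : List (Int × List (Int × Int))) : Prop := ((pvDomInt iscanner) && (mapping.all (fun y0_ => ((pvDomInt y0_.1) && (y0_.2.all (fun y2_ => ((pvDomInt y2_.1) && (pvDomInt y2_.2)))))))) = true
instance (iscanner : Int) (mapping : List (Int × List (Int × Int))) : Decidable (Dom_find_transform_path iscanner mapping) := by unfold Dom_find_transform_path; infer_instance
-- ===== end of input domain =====

-- B rewrites A's recursive DFS helper (which mutates a shared path, popping on backtrack) as an
-- iterative DFS over an explicit stack of (node, remaining-neighbor-keys) frames; same results.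

-- ===== PORT A =====
-- shared dict primitives: Python's mapping[i] (KeyError excluded by Pre_), '0 in mapping[i]', mapping[i].keys()
def pvInner (mapping : List (Int × List (Int × Int))) (i : Int) : PySem.Dict Int Int :=
  PySem.Dict.mk ((PySem.Dict.mk mapping).getD i [])
def pvHas0 (mapping : List (Int × List (Int × Int))) (i : Int) : Bool :=
  (pvInner mapping i).contains 0
def pvKeys (mapping : List (Int × List (Int × Int))) (i : Int) : List Int :=
  PySem.Dict.keys (pvInner mapping i)

-- the 'for j in mapping[i].keys(): if dfs(j, path, mapping): return True' loop, then 'path.pop()'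
def goA (step : Int → List Int → List Int × Bool) : List Int → List Int → List Int × Bool
  | [], p => (p.dropLast, false)
  | j :: rest, p =>
    match step j p with
    | (p', true) => (p', true)
    | (p', false) => goA step rest p'

-- the recursive helper dfs(i, path, mapping); fuel guard only (never hit under Pre_)
def dfsA (mapping : List (Int × List (Int × Int))) : Nat → Int → List Int → List Int × Bool
  | 0, _, path => (path, false)
  | f + 1, i, path =>
    let p := path ++ [i]                    -- path.append(i)
    if pvHas0 mapping i then (p ++ [0], true)
    else goA (dfsA mapping f) (pvKeys mapping i) p

def find_transform_path (iscanner : Int) (mapping : List (Int × List (Int × Int))) : List Int :=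
  (dfsA mapping (2 * mapping.length + 3) iscanner []).1

-- ===== PORT B =====
-- the while loop over the explicit stack; fuel guard only (never hit under Pre_)
def loopB (mapping : List (Int × List (Int × Int))) : Nat → List (Int × List Int) → List Int → List Int
  | 0, _, path => path
  | _ + 1, [], path => path
  | f + 1, (node, rest) :: st, path =>
    match rest with
    | [] => loopB mapping f st path.dropLast           -- stack.pop(); path.pop()
    | j :: rest' =>
      if pvHas0 mapping j then path ++ [j, 0]
      else loopB mapping f ((j, pvKeys mapping j) :: (node, rest') :: st) (path ++ [j])

def pvFuelB (mapping : List (Int × List (Int × Int))) : Nat :=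
  ((mapping.map (fun kv => kv.2.length)).foldl max 0 + 2) ^ (2 * mapping.length + 4)

def find_transform_path_alt (iscanner : Int) (mapping : List (Int × List (Int × Int))) : List Int :=
  if pvHas0 mapping iscanner then [iscanner, 0]
  else loopB mapping (pvFuelB mapping) [(iscanner, pvKeys mapping iscanner)] [iscanner]

-- ===== PRECONDITION & SPEC =====
-- neighbors A's DFS would recurse into from i (none once 0 is a key of mapping[i])
def pvSuccs (mapping : List (Int × List (Int × Int))) (i : Int) : List Int :=
  if pvHas0 mapping i then [] else pvKeys mapping i
-- layer k+1 = keys of mapping all of whose successors lie in layer k (graph peeling; saturates by |mapping| rounds):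
-- exactly the nodes whose FULL exhaustive exploration terminates without a missing key or a cycle
def pvPeel (mapping : List (Int × List (Int × Int))) : Nat → List Int
  | 0 => []
  | k + 1 => (PySem.Dict.keys (PySem.Dict.mk mapping)).filter
      (fun i => (pvSuccs mapping i).all (fun j => decide (j ∈ pvPeel mapping k)))

-- scan of one neighbor list: some neighbor starts a good path, and every neighbor explored before it peels
def pvScan (peelL : List Int) (g : Int → Bool) : List Int → Bool
  | [] => false
  | j :: rest => g j || (decide (j ∈ peelL) && pvScan peelL g rest)

-- good path of length ≤ n: i is a key and either 0 ∈ mapping[i] or some neighbor continues a good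
-- path while all earlier siblings (which the DFS fully explores first) are peel-terminating
def pvGPb (mapping : List (Int × List (Int × Int))) : Nat → Int → Bool
  | 0, _ => false
  | n + 1, i => (PySem.Dict.mk mapping).contains i &&
      (pvHas0 mapping i ||
        pvScan (pvPeel mapping mapping.length) (pvGPb mapping n) (pvKeys mapping i))

-- Pre_ excludes exactly the inputs on which A raises: AssertionError (iscanner = 0), KeyError (the DFS
-- reaches a node that is not a key of mapping before finding 0) or RecursionError (it falls into a cycle);
-- equivalently, A returns iff iscanner's exhaustive exploration terminates (peel layering) or the DFS
-- reaches 0 along some path all of whose earlier-explored sibling subtrees terminate.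
def Pre_find_transform_path (iscanner : Int) (mapping : List (Int × List (Int × Int))) : Prop :=
  iscanner ≠ 0 ∧ (iscanner ∈ pvPeel mapping mapping.length ∨
    pvGPb mapping (mapping.length + 1) iscanner = true)
instance (iscanner : Int) (mapping : List (Int × List (Int × Int))) : Decidable (Pre_find_transform_path iscanner mapping) := by unfold Pre_find_transform_path; infer_instance

def pvWitness_find_transform_path : Int × (List (Int × List (Int × Int))) := (1, [(1, [(0, 7)])])

def Spec_find_transform_path (iscanner : Int) (mapping : List (Int × List (Int × Int))) (out : List Int) : Prop := out = find_transform_path_alt iscanner mapping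
instance (iscanner : Int) (mapping : List (Int × List (Int × Int))) (out : List Int) : Decidable (Spec_find_transform_path iscanner mapping out) := by unfold Spec_find_transform_path; infer_instance

-- ===== CLAIM (what is proved, stated in full; the proofs are below) =====
def Claim_equal_find_transform_path : Prop := ∀ (iscanner : Int) (mapping : List (Int × List (Int × Int))), Dom_find_transform_path iscanner mapping → Pre_find_transform_path iscanner mapping → Spec_find_transform_path iscanner mapping (find_transform_path iscanner mapping)

-- ===== LEMMAS AND PROOFS =====

-- functional description both ports are related to: the path DFS finds from i (none = failure/fuel out)
def solveL (s : Int → Option (List Int)) : List Int → Option (List Int)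
  | [] => none
  | j :: r =>
    match s j with
    | some q => some q
    | none => solveL s r

def solveF (mapping : List (Int × List (Int × Int))) : Nat → Int → Option (List Int)
  | 0, _ => none
  | f + 1, i =>
    if pvHas0 mapping i then some [i, 0]
    else (solveL (solveF mapping f) (pvKeys mapping i)).map (i :: ·)

-- the ACTUAL exploration terminates within the given fuel: a neighbor list is fine when each neighbor
-- explored (i.e. before the first success) is fine
def ExecL (t : Int → Prop) (sf : Int → Option (List Int)) : List Int → Prop
  | [] => True
  | j :: r => t j ∧ (sf j = none → ExecL t sf r)

def ExecT (mapping : List (Int × List (Int × Int))) : Nat → Int → Prop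
  | 0, _ => False
  | f + 1, i => pvHas0 mapping i = true ∨
      ExecL (ExecT mapping f) (solveF mapping f) (pvKeys mapping i)

-- exact number of loop iterations B spends on a frame whose remaining list is l (solve fuel f)
def costC (mapping : List (Int × List (Int × Int))) : Nat → List Int → Nat
  | _, [] => 1
  | 0, _ :: r => 1 + costC mapping 0 r
  | f + 1, j :: r =>
    if pvHas0 mapping j then 1
    else 1 + costC mapping f (pvKeys mapping j) +
      (match solveL (solveF mapping f) (pvKeys mapping j) with
       | some _ => 0
       | none => costC mapping (f + 1) r)
termination_by f l => (f, l.length)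

theorem goA_eq (s : Int → Option (List Int)) (step : Int → List Int → List Int × Bool)
    (h : ∀ j p, step j p = match s j with | some q => (p ++ q, true) | none => (p, false)) :
    ∀ (l : List Int) (p : List Int),
      goA step l p = match solveL s l with | some q => (p ++ q, true) | none => (p.dropLast, false) := by
  intro l
  induction l with
  | nil => intro p; rfl
  | cons j rest ih =>
    intro p
    simp only [goA, solveL, h]
    cases s j with
    | some q => rfl
    | none => exact ih p

theorem dfsA_eq (mapping : List (Int × List (Int × Int))) :
    ∀ (f : Nat) (i : Int) (path : List Int),
      dfsA mapping f i path =
        match solveF mapping f i with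
        | some p => (path ++ p, true)
        | none => (path, false) := by
  intro f
  induction f with
  | zero => intro i path; rfl
  | succ f ih =>
    intro i path
    by_cases h0 : pvHas0 mapping i = true
    · simp [dfsA, solveF, h0]
    · simp only [dfsA, solveF, h0, Bool.false_eq_true, if_false]
      rw [goA_eq (solveF mapping f) (dfsA mapping f) ih]
      cases hc : solveL (solveF mapping f) (pvKeys mapping i) with
      | some q => simp
      | none => simp

theorem solveF_succ (mapping : List (Int × List (Int × Int))) (f : Nat) (i : Int) :
    solveF mapping (f + 1) i =
      if pvHas0 mapping i then some [i, 0]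
      else (solveL (solveF mapping f) (pvKeys mapping i)).map (i :: ·) := rfl

-- pointwise termination of every element gives ExecL unconditionally
theorem execL_of_all (t : Int → Prop) (sf : Int → Option (List Int)) :
    ∀ (l : List Int), (∀ j ∈ l, t j) → ExecL t sf l := by
  intro l
  induction l with
  | nil => intro _; trivial
  | cons j r ih =>
    intro h
    exact ⟨h j (by simp), fun _ => ih (fun x hx => h x (by simp [hx]))⟩

-- fuel monotonicity of ExecT together with stability of solveF on terminating nodes
theorem exec_stab (mapping : List (Int × List (Int × Int))) :
    ∀ (f : Nat) (i : Int), ExecT mapping f i →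
      ExecT mapping (f + 1) i ∧ solveF mapping (f + 1) i = solveF mapping f i := by
  intro f
  induction f with
  | zero => intro i h; exact absurd h (by simp [ExecT])
  | succ f ih =>
    have aux : ∀ (l : List Int), ExecL (ExecT mapping f) (solveF mapping f) l →
        ExecL (ExecT mapping (f + 1)) (solveF mapping (f + 1)) l ∧
        solveL (solveF mapping (f + 1)) l = solveL (solveF mapping f) l := by
      intro l
      induction l with
      | nil => intro _; exact ⟨trivial, rfl⟩
      | cons j r ihl =>
        intro hE
        obtain ⟨hj, hcond⟩ := hE
        obtain ⟨hj', hs⟩ := ih j hj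
        constructor
        · exact ⟨hj', fun hn => (ihl (hcond (by rw [← hs]; exact hn))).1⟩
        · simp only [solveL, hs]
          cases hc : solveF mapping f j with
          | some q => rfl
          | none => exact (ihl (hcond hc)).2
    intro i h
    rcases h with h0 | hL
    · exact ⟨Or.inl h0, by simp [solveF, h0]⟩
    · by_cases h0 : pvHas0 mapping i = true
      · exact ⟨Or.inl h0, by simp [solveF, h0]⟩
      · refine ⟨Or.inr (aux _ hL).1, ?_⟩
        rw [solveF_succ, solveF_succ]
        simp only [h0, Bool.false_eq_true, if_false]
        rw [(aux _ hL).2]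

theorem exec_le (mapping : List (Int × List (Int × Int))) :
    ∀ (f g : Nat), f ≤ g → ∀ (i : Int), ExecT mapping f i →
      ExecT mapping g i ∧ solveF mapping g i = solveF mapping f i := by
  intro f g hfg
  induction g, hfg using Nat.le_induction with
  | base => intro i h; exact ⟨h, rfl⟩
  | succ g hfg ih =>
    intro i h
    obtain ⟨h1, h2⟩ := ih i h
    obtain ⟨h3, h4⟩ := exec_stab mapping g i h1
    exact ⟨h3, by rw [h4, h2]⟩

-- peel layers are monotone in k and consist of terminating nodes
theorem peel_exec (mapping : List (Int × List (Int × Int))) :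
    ∀ (k : Nat) (i : Int), i ∈ pvPeel mapping k → ExecT mapping k i := by
  intro k
  induction k with
  | zero => intro i h; simp [pvPeel] at h
  | succ k ih =>
    intro i h
    simp only [pvPeel, List.mem_filter, List.all_eq_true, decide_eq_true_eq] at h
    by_cases h0 : pvHas0 mapping i = true
    · exact Or.inl h0
    · refine Or.inr (execL_of_all _ _ _ ?_)
      intro j hj
      exact ih j (h.2 j (by simp [pvSuccs, h0, hj]))

-- a good path guarantees the exploration terminates AND succeeds (solveF ≠ none)
theorem gp_exec (mapping : List (Int × List (Int × Int))) :
    ∀ (n : Nat) (i : Int), pvGPb mapping n i = true →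
      ExecT mapping (n + mapping.length) i ∧
      solveF mapping (n + mapping.length) i ≠ none := by
  intro n
  induction n with
  | zero => intro i h; simp [pvGPb] at h
  | succ n ih =>
    have scan : ∀ (l : List Int),
        pvScan (pvPeel mapping mapping.length) (pvGPb mapping n) l = true →
        ExecL (ExecT mapping (n + mapping.length)) (solveF mapping (n + mapping.length)) l ∧
        solveL (solveF mapping (n + mapping.length)) l ≠ none := by
      intro l
      induction l with
      | nil => intro h; simp [pvScan] at h
      | cons j rest ihl =>
        intro h
        simp only [pvScan, Bool.or_eq_true, Bool.and_eq_true, decide_eq_true_eq] at h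
        rcases h with hb | ⟨hpeel, hrest⟩
        · obtain ⟨hE, hs⟩ := ih j hb
          refine ⟨⟨hE, fun hn => absurd hn hs⟩, ?_⟩
          simp only [solveL]
          cases hc : solveF mapping (n + mapping.length) j with
          | some q => simp
          | none => exact absurd hc hs
        · have hEj : ExecT mapping (n + mapping.length) j :=
            (exec_le mapping mapping.length (n + mapping.length) (by omega) j
              (peel_exec mapping mapping.length j hpeel)).1
          refine ⟨⟨hEj, fun _ => (ihl hrest).1⟩, ?_⟩
          simp only [solveL]
          cases hc : solveF mapping (n + mapping.length) j with
          | some q => simp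
          | none => exact (ihl hrest).2
    intro i h
    simp only [pvGPb, Bool.and_eq_true, Bool.or_eq_true] at h
    have harr : n + 1 + mapping.length = (n + mapping.length) + 1 := by omega
    rw [harr]
    rcases h.2 with h0 | hsc
    · exact ⟨Or.inl h0, by simp [solveF, h0]⟩
    · obtain ⟨hE, hs⟩ := scan (pvKeys mapping i) hsc
      by_cases h0 : pvHas0 mapping i = true
      · exact ⟨Or.inl h0, by simp [solveF, h0]⟩
      · refine ⟨Or.inr hE, ?_⟩
        simp only [solveF, h0, Bool.false_eq_true, if_false, ne_eq, Option.map_eq_none_iff]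
        exact hs

theorem loopB_nil (mapping : List (Int × List (Int × Int))) :
    ∀ (g : Nat) (path : List Int), loopB mapping g [] path = path := by
  intro g path
  cases g <;> rfl

theorem loopB_eq (mapping : List (Int × List (Int × Int))) :
    ∀ (f : Nat) (l : List Int), ExecL (ExecT mapping f) (solveF mapping f) l →
      ∀ (n : Int) (st : List (Int × List Int)) (path : List Int) (g : Nat),
        loopB mapping (costC mapping f l + g) ((n, l) :: st) path =
          match solveL (solveF mapping f) l with
          | some q => path ++ q
          | none => loopB mapping g st path.dropLast := by
  intro f
  induction f with
  | zero =>
    intro l hE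
    cases l with
    | nil =>
      intro n st path g
      have h1 : costC mapping 0 [] = 1 := by simp [costC]
      rw [h1, Nat.add_comm]
      rfl
    | cons j r => exact absurd hE.1 (by simp [ExecT])
  | succ f ih =>
    intro l
    induction l with
    | nil =>
      intro _ n st path g
      have h1 : costC mapping (f + 1) [] = 1 := by simp [costC]
      rw [h1, Nat.add_comm]
      rfl
    | cons j r ihr =>
      intro hE n st path g
      obtain ⟨hj, hcond⟩ := hE
      by_cases h0 : pvHas0 mapping j = true
      · simp [costC, h0, loopB, solveL, solveF, Nat.add_comm 1 g]
      · have hkeysE : ExecL (ExecT mapping f) (solveF mapping f) (pvKeys mapping j) := by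
          rcases hj with h | h
          · exact absurd h h0
          · exact h
        cases hc : solveL (solveF mapping f) (pvKeys mapping j) with
        | some q =>
          have hcost : costC mapping (f + 1) (j :: r) =
              1 + costC mapping f (pvKeys mapping j) := by
            simp [costC, h0, hc]
          rw [hcost]
          have : 1 + costC mapping f (pvKeys mapping j) + g =
              (costC mapping f (pvKeys mapping j) + g) + 1 := by omega
          rw [this]
          simp only [loopB, h0, Bool.false_eq_true, if_false]
          rw [ih (pvKeys mapping j) hkeysE]
          simp [hc, solveL, solveF, h0]
        | none =>
          have hnone : solveF mapping (f + 1) j = none := by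
            simp [solveF, h0, hc]
          have hcost : costC mapping (f + 1) (j :: r) =
              1 + costC mapping f (pvKeys mapping j) + costC mapping (f + 1) r := by
            simp [costC, h0, hc]
          rw [hcost]
          have : 1 + costC mapping f (pvKeys mapping j) + costC mapping (f + 1) r + g =
              (costC mapping f (pvKeys mapping j) + (costC mapping (f + 1) r + g)) + 1 := by omega
          rw [this]
          simp only [loopB, h0, Bool.false_eq_true, if_false]
          rw [ih (pvKeys mapping j) hkeysE]
          simp only [hc]
          rw [List.dropLast_concat]
          rw [ihr (hcond hnone)]
          simp [solveL, solveF, h0, hc]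

theorem costC_le (mapping : List (Int × List (Int × Int))) (K : Nat) (hK2 : 2 ≤ K)
    (hK : ∀ i, (pvKeys mapping i).length + 2 ≤ K) :
    ∀ (f : Nat) (l : List Int), costC mapping f l ≤ (l.length + 1) * K ^ f := by
  intro f
  induction f with
  | zero =>
    intro l
    induction l with
    | nil => simp [costC]
    | cons j r ihr => simp only [costC, pow_zero, mul_one] at *; simp; omega
  | succ f ih =>
    intro l
    induction l with
    | nil =>
      simp only [costC, List.length_nil, Nat.zero_add, Nat.one_mul]
      exact Nat.one_le_pow _ _ (by omega)
    | cons j r ihr =>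
      by_cases h0 : pvHas0 mapping j = true
      · simp only [costC, h0, if_true]
        have : 1 ≤ K ^ (f + 1) := Nat.one_le_pow _ _ (by omega)
        calc 1 ≤ K ^ (f + 1) := this
          _ ≤ ((j :: r).length + 1) * K ^ (f + 1) := Nat.le_mul_of_pos_left _ (by simp)
      · have h1 : 1 + costC mapping f (pvKeys mapping j) ≤ K ^ (f + 1) := by
          have hc1 : costC mapping f (pvKeys mapping j) ≤
              ((pvKeys mapping j).length + 1) * K ^ f := ih _
          have hp : 1 ≤ K ^ f := Nat.one_le_pow _ _ (by omega)
          have hd : (pvKeys mapping j).length + 2 ≤ K := hK j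
          calc 1 + costC mapping f (pvKeys mapping j)
              ≤ K ^ f + ((pvKeys mapping j).length + 1) * K ^ f := by omega
            _ = ((pvKeys mapping j).length + 2) * K ^ f := by ring
            _ ≤ K * K ^ f := Nat.mul_le_mul_right _ hd
            _ = K ^ (f + 1) := by ring
        cases hc : solveL (solveF mapping f) (pvKeys mapping j) with
        | some q =>
          have hcost : costC mapping (f + 1) (j :: r) =
              1 + costC mapping f (pvKeys mapping j) := by simp [costC, h0, hc]
          rw [hcost]
          calc 1 + costC mapping f (pvKeys mapping j) ≤ K ^ (f + 1) := h1
            _ ≤ ((j :: r).length + 1) * K ^ (f + 1) := Nat.le_mul_of_pos_left _ (by simp)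
        | none =>
          have hcost : costC mapping (f + 1) (j :: r) =
              1 + costC mapping f (pvKeys mapping j) + costC mapping (f + 1) r := by
            simp [costC, h0, hc]
          rw [hcost]
          have h2 : costC mapping (f + 1) r ≤ (r.length + 1) * K ^ (f + 1) := ihr
          calc 1 + costC mapping f (pvKeys mapping j) + costC mapping (f + 1) r
              ≤ K ^ (f + 1) + (r.length + 1) * K ^ (f + 1) := by omega
            _ = (r.length + 2) * K ^ (f + 1) := by ring
            _ = ((j :: r).length + 1) * K ^ (f + 1) := by simp

theorem keys_len_le (mapping : List (Int × List (Int × Int))) (i : Int) :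
    (pvKeys mapping i).length ≤ (mapping.map (fun kv => kv.2.length)).foldl max 0 := by
  have hkeys : (pvKeys mapping i).length
      = ((PySem.Dict.mk mapping).getD i ([] : List (Int × Int))).length := by
    simp [pvKeys, pvInner, PySem.Dict.keys]
  rw [hkeys]
  cases hg : (PySem.Dict.mk mapping).get? i with
  | none => rw [PySem.Dict.getD_of_get?_eq_none _ _ hg]; simp
  | some v =>
    rw [PySem.Dict.getD_of_get?_eq_some _ _ hg]
    have hm : (i, v) ∈ mapping := PySem.Dict.mem_items_of_get?_eq_some _ hg
    exact ((PySem.List.le_foldl_max (mapping.map (fun kv => kv.2.length)) 0).2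
      v.length (List.mem_map.mpr ⟨(i, v), hm, rfl⟩))

theorem find_transform_path_spec : Claim_equal_find_transform_path := by
  unfold Claim_equal_find_transform_path
  intro iscanner mapping _ hpre
  unfold Spec_find_transform_path
  obtain ⟨-, hcase⟩ := hpre
  have hexec : ExecT mapping (2 * mapping.length + 3) iscanner := by
    rcases hcase with hpeel | hgp
    · exact (exec_le mapping mapping.length (2 * mapping.length + 3) (by omega) iscanner
        (peel_exec mapping mapping.length iscanner hpeel)).1
    · exact (exec_le mapping (mapping.length + 1 + mapping.length) (2 * mapping.length + 3)
        (by omega) iscanner (gp_exec mapping (mapping.length + 1) iscanner hgp).1).1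
  unfold find_transform_path find_transform_path_alt
  rw [dfsA_eq mapping]
  have h3 : 2 * mapping.length + 3 = (2 * mapping.length + 2) + 1 := by omega
  rw [h3] at hexec ⊢
  by_cases h0 : pvHas0 mapping iscanner = true
  · simp [solveF, h0]
  · have hE : ExecL (ExecT mapping (2 * mapping.length + 2))
        (solveF mapping (2 * mapping.length + 2)) (pvKeys mapping iscanner) := by
      rcases hexec with h | h
      · exact absurd h h0
      · exact h
    set K := (mapping.map (fun kv => kv.2.length)).foldl max 0 + 2 with hK
    have hK2 : 2 ≤ K := by omega
    have hKb : ∀ i, (pvKeys mapping i).length + 2 ≤ K := by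
      intro i; have := keys_len_le mapping i; omega
    have hcost : costC mapping (2 * mapping.length + 2) (pvKeys mapping iscanner) ≤ pvFuelB mapping := by
      have h1 := costC_le mapping K hK2 hKb (2 * mapping.length + 2) (pvKeys mapping iscanner)
      have hd : (pvKeys mapping iscanner).length + 2 ≤ K := hKb iscanner
      have hfuel : pvFuelB mapping = K ^ (2 * mapping.length + 4) := by
        simp only [pvFuelB, hK]
      calc costC mapping (2 * mapping.length + 2) (pvKeys mapping iscanner)
          ≤ ((pvKeys mapping iscanner).length + 1) * K ^ (2 * mapping.length + 2) := h1
        _ ≤ K ^ 2 * K ^ (2 * mapping.length + 2) := Nat.mul_le_mul_right _ (by nlinarith)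
        _ = K ^ (2 * mapping.length + 4) := by
            rw [← pow_add]
            congr 1
            omega
        _ = pvFuelB mapping := hfuel.symm
    obtain ⟨g, hg⟩ : ∃ g, pvFuelB mapping
        = costC mapping (2 * mapping.length + 2) (pvKeys mapping iscanner) + g :=
      ⟨_, (Nat.add_sub_cancel' hcost).symm⟩
    simp only [h0, Bool.false_eq_true, if_false]
    rw [hg, loopB_eq mapping (2 * mapping.length + 2) _ hE]
    have hsf : solveF mapping ((2 * mapping.length + 2) + 1) iscanner
        = (solveL (solveF mapping (2 * mapping.length + 2)) (pvKeys mapping iscanner)).map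
            (iscanner :: ·) := by
      rw [solveF]
      simp [h0]
    cases hres : solveL (solveF mapping (2 * mapping.length + 2)) (pvKeys mapping iscanner) with
    | some q => rw [hsf, hres]; simp
    | none => rw [hsf, hres]; simp [loopB_nil]
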